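-- pv_equiv track=rewrite | github.com/zackseyun/cartha-translation | tools/enoch/run_ocr_batch.py | parse_chapters_arg
-- ===== SOURCE A (Python) =====
-- def parse_chapters_arg(spec: str, available: set[int]) -> list[int]:
--     if spec == "all":
--         return sorted(available)
--     chapters: set[int] = set()
--     for part in spec.split(","):
--         token = part.strip()
--         if not token:
--             continue
--         if "-" in token:
--             a, b = token.split("-", 1)
--             chapters.update(range(int(a), int(b) + 1))
--         else:
--             chapters.add(int(token))
--     return sorted(c for c in chapters if c in available)
-- ===== SOURCE B (Python) =====
-- def parse_chapters_arg(spec: str, available: set[int]) -> list[int]: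
--     if spec == "all":
--         return sorted(available)
--
--     def to_interval(token: str) -> tuple[int, int]:
--         if "-" in token:
--             a, b = token.split("-", 1)
--             return (int(a), int(b))
--         n = int(token)
--         return (n, n)
--
--     tokens = [t for t in (p.strip() for p in spec.split(",")) if t]
--     intervals = [to_interval(t) for t in tokens]
--     return sorted(c for c in set(available)
--                   if any(lo <= c <= hi for lo, hi in intervals))
-- ===== Notes on version B (the rewrite author's own statement) =====
-- stated objective: alternative
-- what changed: B never materialises chapter sets: it stages the spec through strip/filter/map into a list of closed intervals (singletons become (n,n)) and then keeps each distinct available chapter that lies in some interval, instead of A's single fold that expands every range into an accumulating set and intersects it with available.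
import Mathlib
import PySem

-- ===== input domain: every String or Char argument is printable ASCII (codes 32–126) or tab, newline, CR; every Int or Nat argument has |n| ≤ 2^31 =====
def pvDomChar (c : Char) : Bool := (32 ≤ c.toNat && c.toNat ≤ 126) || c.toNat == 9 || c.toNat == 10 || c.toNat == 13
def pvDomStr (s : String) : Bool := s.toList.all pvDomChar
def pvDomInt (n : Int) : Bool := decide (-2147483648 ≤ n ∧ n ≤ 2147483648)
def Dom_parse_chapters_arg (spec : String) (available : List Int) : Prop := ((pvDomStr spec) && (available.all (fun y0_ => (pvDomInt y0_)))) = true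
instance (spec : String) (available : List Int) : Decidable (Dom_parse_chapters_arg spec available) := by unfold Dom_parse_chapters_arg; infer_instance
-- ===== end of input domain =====

-- B stages the spec through strip/filter/map into a list of closed intervals (singletons = (n,n))
-- and filters the distinct available chapters against them, instead of A's fold that expands every
-- range into an accumulating set and intersects it with available (alternative decomposition).


-- ===== PORT A =====
-- one iteration of A's loop over the comma-separated parts; `none` = a ValueError was raised
def pvA_step (st : Option (PySem.Set Int)) (part : String) : Option (PySem.Set Int) :=
  match st with
  | none => none
  | some ch =>
    let token := PySem.Str.strip part
    if token = "" then some ch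
    else if PySem.Str.isIn "-" token then
      match PySem.Str.splitMax? token "-" 1 with
      | some [a, b] =>
        match PySem.Int.ofStr? a, PySem.Int.ofStr? b with
        | some ia, some ib => some (PySem.Set.update ch (PySem.List.pyRange ia (ib + 1) 1))
        | _, _ => none
      | _ => none
    else
      match PySem.Int.ofStr? token with
      | some i => some (PySem.Set.add ch i)
      | none => none

def parse_chapters_arg (spec : String) (available : List Int) : List Int :=
  if spec = "all" then PySem.List.sorted available (fun x => x) false
  else
    match ((PySem.Str.split? spec ",").getD []).foldl pvA_step (some PySem.Set.empty) with
    | some chapters =>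
        PySem.List.sorted (chapters.filter (fun c => available.contains c)) (fun x => x) false
    | none => []   -- Python raises ValueError here; excluded by Pre_

-- ===== PORT B =====
-- Source B's to_interval: a token becomes a closed interval; `none` = ValueError
def pvTok? (token : String) : Option (Int × Int) :=
  if PySem.Str.isIn "-" token then
    match PySem.Str.splitMax? token "-" 1 with
    | some [a, b] =>
      match PySem.Int.ofStr? a, PySem.Int.ofStr? b with
      | some ia, some ib => some (ia, ib)
      | _, _ => none
    | _ => none
  else (PySem.Int.ofStr? token).map (fun n => (n, n))

-- the list comprehension [to_interval(t) for t in tokens]: first failure = ValueError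
def pvIntervals? : List String → Option (List (Int × Int))
  | [] => some []
  | t :: ts =>
    match pvTok? t, pvIntervals? ts with
    | some iv, some ivs => some (iv :: ivs)
    | _, _ => none

-- any(lo <= c <= hi for lo, hi in intervals)
def pvInAny (ivs : List (Int × Int)) (c : Int) : Bool :=
  ivs.any (fun q => decide (q.1 ≤ c) && decide (c ≤ q.2))

def parse_chapters_arg_alt (spec : String) (available : List Int) : List Int :=
  if spec = "all" then PySem.List.sorted available (fun x => x) false
  else
    let tokens := (((PySem.Str.split? spec ",").getD []).map PySem.Str.strip).filter (· ≠ "")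
    match pvIntervals? tokens with
    | some ivs =>
        PySem.List.sorted ((PySem.Set.ofList available).filter (pvInAny ivs)) (fun x => x) false
    | none => []   -- Python raises ValueError here; excluded by Pre_

-- ===== PRECONDITION & SPEC =====
-- a comma token is fine if (after stripping) it is empty, or parses as an int, or as an "a-b" pair of ints
def pvTokenOk (part : String) : Bool :=
  let token := PySem.Str.strip part
  if token = "" then true
  else if PySem.Str.isIn "-" token then
    match PySem.Str.splitMax? token "-" 1 with
    | some [a, b] => (PySem.Int.ofStr? a).isSome && (PySem.Int.ofStr? b).isSome
    | _ => false
  else (PySem.Int.ofStr? token).isSome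

-- Pre_ excludes exactly the specs on which A raises ValueError (a token that is not an int / not an int-int pair)
def Pre_parse_chapters_arg (spec : String) (available : List Int) : Prop :=
  spec = "all" ∨ ((PySem.Str.split? spec ",").getD []).all pvTokenOk = true

instance (spec : String) (available : List Int) : Decidable (Pre_parse_chapters_arg spec available) := by
  unfold Pre_parse_chapters_arg; infer_instance

def pvWitness_parse_chapters_arg : String × List Int := ("1-3, 7", [2, 3, 7, 10])

def Spec_parse_chapters_arg (spec : String) (available : List Int) (out : List Int) : Prop :=
  out = parse_chapters_arg_alt spec available
instance (spec : String) (available : List Int) (out : List Int) : Decidable (Spec_parse_chapters_arg spec available out) := by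
  unfold Spec_parse_chapters_arg; infer_instance

-- ===== CLAIM (what is proved, stated in full; the proofs are below) =====
def Claim_equal_parse_chapters_arg : Prop := ∀ (spec : String) (available : List Int), Dom_parse_chapters_arg spec available → Pre_parse_chapters_arg spec available → Spec_parse_chapters_arg spec available (parse_chapters_arg spec available)

-- ===== LEMMAS AND PROOFS =====

-- the simulation: A's running set vs B's interval list, relative to the starting set ch
def pvRel (ch : PySem.Set Int) : Option (PySem.Set Int) → Option (List (Int × Int)) → Prop
  | some ch', some ivs => (ch.Nodup → ch'.Nodup) ∧ ∀ c : Int, c ∈ ch' ↔ c ∈ ch ∨ pvInAny ivs c = true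
  | none, none => True
  | _, _ => False

lemma pvFoldl_none (parts : List String) : parts.foldl pvA_step none = none := by
  induction parts with
  | nil => rfl
  | cons p t ih => exact ih

set_option maxHeartbeats 1000000 in
lemma pvFold_rel (parts : List String) (ch : PySem.Set Int) :
    pvRel ch (parts.foldl pvA_step (some ch))
      (pvIntervals? ((parts.map PySem.Str.strip).filter (· ≠ ""))) := by
  induction parts generalizing ch with
  | nil => exact ⟨id, fun c => by simp [pvInAny]⟩
  | cons p t ih =>
    simp only [List.foldl_cons, List.map_cons, pvA_step]
    generalize PySem.Str.strip p = tok
    by_cases h0 : tok = ""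
    · simpa [h0] using ih ch
    · rw [List.filter_cons_of_pos (by simpa using h0)]
      by_cases h1 : PySem.Str.isIn "-" tok = true
      · cases hsp : PySem.Str.splitMax? tok "-" 1 with
        | none =>
          simp only [pvIntervals?, pvTok?, hsp, if_neg h0, if_pos h1, pvFoldl_none]
          exact trivial
        | some l =>
          match l with
          | [] => simp only [pvIntervals?, pvTok?, hsp, if_neg h0, if_pos h1, pvFoldl_none]; exact trivial
          | [_] => simp only [pvIntervals?, pvTok?, hsp, if_neg h0, if_pos h1, pvFoldl_none]; exact trivial
          | _ :: _ :: _ :: _ => simp only [pvIntervals?, pvTok?, hsp, if_neg h0, if_pos h1, pvFoldl_none]; exact trivial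
          | [a, b] =>
            cases ha : PySem.Int.ofStr? a with
            | none =>
              simp only [pvIntervals?, pvTok?, hsp, ha, if_neg h0, if_pos h1, pvFoldl_none]
              cases PySem.Int.ofStr? b <;> exact trivial
            | some ia =>
              cases hb : PySem.Int.ofStr? b with
              | none =>
                simp only [pvIntervals?, pvTok?, hsp, ha, hb, if_neg h0, if_pos h1, pvFoldl_none]
                exact trivial
              | some ib =>
                simp only [pvTok?, pvIntervals?, hsp, ha, hb, if_neg h0, if_pos h1]
                have hrec := ih (PySem.Set.update ch (PySem.List.pyRange ia (ib + 1) 1))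
                match hA : t.foldl pvA_step (some (PySem.Set.update ch (PySem.List.pyRange ia (ib + 1) 1))),
                      hB : pvIntervals? ((t.map PySem.Str.strip).filter (· ≠ "")) with
                | none, none => exact trivial
                | none, some _ => rw [hA, hB] at hrec; exact absurd hrec (by simp [pvRel])
                | some _, none => rw [hA, hB] at hrec; exact absurd hrec (by simp [pvRel])
                | some ch', some ivs =>
                  rw [hA, hB] at hrec
                  obtain ⟨hnd, hmem⟩ := hrec
                  refine ⟨fun h => hnd (PySem.Set.nodup_update ch _ h), fun c => ?_⟩
                  rw [hmem c, PySem.Set.mem_update, PySem.List.mem_pyRange_one]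
                  simp only [pvInAny, List.any_cons, Bool.or_eq_true, Bool.and_eq_true,
                    decide_eq_true_eq]
                  rw [Int.lt_add_one_iff]
                  tauto
      · cases ht : PySem.Int.ofStr? tok with
        | none =>
          simp only [pvIntervals?, pvTok?, ht, if_neg h0, if_neg h1, Option.map_none,
            pvFoldl_none]
          exact trivial
        | some i =>
          simp only [pvTok?, pvIntervals?, ht, if_neg h0, if_neg h1, Option.map_some]
          have hrec := ih (PySem.Set.add ch i)
          match hA : t.foldl pvA_step (some (PySem.Set.add ch i)),
                hB : pvIntervals? ((t.map PySem.Str.strip).filter (· ≠ "")) with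
          | none, none => exact trivial
          | none, some _ => rw [hA, hB] at hrec; exact absurd hrec (by simp [pvRel])
          | some _, none => rw [hA, hB] at hrec; exact absurd hrec (by simp [pvRel])
          | some ch', some ivs =>
            rw [hA, hB] at hrec
            obtain ⟨hnd, hmem⟩ := hrec
            refine ⟨fun h => hnd (PySem.Set.nodup_add ch i h), fun c => ?_⟩
            rw [hmem c, PySem.Set.mem_add]
            simp only [pvInAny, List.any_cons, Bool.or_eq_true, Bool.and_eq_true,
              decide_eq_true_eq]
            constructor
            · rintro ((hc | hc) | hc)
              exacts [Or.inl hc, Or.inr (Or.inl ⟨le_of_eq hc.symm, le_of_eq hc⟩), Or.inr (Or.inr hc)]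
            · rintro (hc | ⟨h₁, h₂⟩ | hc)
              exacts [Or.inl (Or.inl hc), Or.inl (Or.inr (le_antisymm h₂ h₁)), Or.inr hc]

theorem parse_chapters_arg_spec : Claim_equal_parse_chapters_arg := by
  unfold Claim_equal_parse_chapters_arg
  intro spec available _ _
  unfold Spec_parse_chapters_arg parse_chapters_arg parse_chapters_arg_alt
  split
  · rfl
  · have hrel := pvFold_rel ((PySem.Str.split? spec ",").getD []) PySem.Set.empty
    match hA : ((PySem.Str.split? spec ",").getD []).foldl pvA_step (some PySem.Set.empty),
          hB : pvIntervals? (((((PySem.Str.split? spec ",").getD []).map PySem.Str.strip)).filter (· ≠ "")) with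
    | none, none => simp only [hB]
    | none, some _ => rw [hA, hB] at hrel; exact absurd hrel (by simp [pvRel])
    | some _, none => rw [hA, hB] at hrel; exact absurd hrel (by simp [pvRel])
    | some ch, some ivs =>
      rw [hA, hB] at hrel
      obtain ⟨hnd, hmem⟩ := hrel
      simp only [hB]
      apply PySem.List.sorted_eq_sorted_of_perm _ _ _ (fun a b hab => hab)
      rw [List.perm_ext_iff_of_nodup ((hnd List.nodup_nil).filter _)
        ((PySem.Set.nodup_ofList available).filter _)]
      intro c
      have := hmem c
      simp only [PySem.Set.empty, List.not_mem_nil, false_or] at this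
      simp only [List.mem_filter, PySem.Set.mem_ofList, this, List.contains_eq_mem,
        decide_eq_true_eq]
      tauto
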